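-- pv_equiv track=rewrite | github.com/jpbayonap/programs | python_pr/running_times.py | cuadratica_resta
-- ===== SOURCE A (Python) =====
-- def cuadratica_resta(seq):
--     t=0
--     count= 0
--     for j in seq : #working with  elements
--         count += 1
--         for k in seq :
--             t += j*k
--         for l in range(count):
--             t -= j*seq[l]
--     return t
-- ===== SOURCE B (Python) =====
-- def cuadratica_resta(seq):
--     total = sum(seq)
--     t = 0
--     pre = 0
--     for x in seq:
--         pre += x
--         t += x * (total - pre)
--     return t
-- ===== Notes on version B (the rewrite author's own statement) =====
-- stated objective: faster
-- what changed: Replaced the O(n^2) nested loops (full re-sum and prefix re-scan per element) by one pass keeping the total sum and a running prefix sum, adding x*(total-prefix) per element.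
import Mathlib
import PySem

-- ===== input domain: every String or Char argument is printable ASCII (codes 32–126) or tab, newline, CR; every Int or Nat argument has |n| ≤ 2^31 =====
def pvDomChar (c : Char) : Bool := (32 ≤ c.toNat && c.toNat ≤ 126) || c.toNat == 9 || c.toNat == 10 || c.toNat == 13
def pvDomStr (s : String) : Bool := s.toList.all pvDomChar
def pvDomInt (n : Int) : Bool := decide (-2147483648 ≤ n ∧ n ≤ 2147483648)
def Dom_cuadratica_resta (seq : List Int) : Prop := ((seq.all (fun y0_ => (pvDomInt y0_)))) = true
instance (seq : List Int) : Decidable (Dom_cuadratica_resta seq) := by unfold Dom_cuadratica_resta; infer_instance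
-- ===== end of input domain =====

-- B replaces A's quadratic nested loops by a single pass over the list that keeps the
-- total sum and a running prefix sum (objective: faster, O(n) instead of O(n^2)).

-- ===== PORT A =====
-- literal transliteration: outer loop carries (t, count); per element the full re-sum
-- loop, then the prefix-subtraction loop over range(count) indexing seq[l]
def cuadratica_resta (seq : List Int) : Int :=
  (seq.foldl (fun (st : Int × Int) j =>
      let count := st.2 + 1
      let t1 := seq.foldl (fun t k => t + j * k) st.1
      let t2 := (PySem.List.pyRange 0 count 1).foldl
                  (fun t l => t - j * PySem.List.pyGetD seq l 0) t1
      (t2, count)) (0, 0)).1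

-- ===== PORT B =====
def cuadratica_resta_alt (seq : List Int) : Int :=
  let total := seq.foldl (· + ·) 0
  (seq.foldl (fun (st : Int × Int) x =>
      let pre := st.2 + x
      (st.1 + x * (total - pre), pre)) (0, 0)).1

-- ===== PRECONDITION & SPEC =====
def Spec_cuadratica_resta (seq : List Int) (out : Int) : Prop := out = cuadratica_resta_alt seq
instance (seq : List Int) (out : Int) : Decidable (Spec_cuadratica_resta seq out) := by unfold Spec_cuadratica_resta; infer_instance

-- ===== CLAIM (what is proved, stated in full; the proofs are below) =====
def Claim_equal_cuadratica_resta : Prop := ∀ (seq : List Int), Dom_cuadratica_resta seq → Spec_cuadratica_resta seq (cuadratica_resta seq)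

-- ===== LEMMAS AND PROOFS =====

-- A's inner re-sum loop adds j * (sum of the list)
theorem pvInner1 (j : Int) : ∀ (l : List Int) (t0 : Int),
    l.foldl (fun t k => t + j * k) t0 = t0 + j * l.sum := by
  intro l
  induction l with
  | nil => intro t0; simp
  | cons x xs ih => intro t0; simp [List.foldl_cons, ih]; ring

-- A's prefix-subtraction loop over range(count) subtracts j * (sum of the first m elements)
theorem pvInner2 (seq : List Int) (j : Int) : ∀ (m : Nat), m ≤ seq.length → ∀ (t0 : Int),
    (PySem.List.pyRange 0 (m : Int) 1).foldl (fun t l => t - j * PySem.List.pyGetD seq l 0) t0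
      = t0 - j * (seq.take m).sum := by
  intro m
  induction m with
  | zero => intro _ t0; simp [PySem.List.pyRange_one_eq_nil]
  | succ n ih =>
    intro hm t0
    have h1 : (0 : Int) ≤ (n : Int) := by positivity
    have hrw : PySem.List.pyRange 0 ((n + 1 : Nat) : Int) 1
        = PySem.List.pyRange 0 (n : Int) 1 ++ [(n : Int)] := by
      have hc : ((n + 1 : Nat) : Int) = (n : Int) + 1 := by push_cast; ring
      rw [hc, PySem.List.pyRange_one_succ_right h1]
    rw [hrw, List.foldl_append, ih (by omega) t0]
    have hn : n < seq.length := by omega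
    have hget : PySem.List.pyGetD seq (n : Int) 0 = seq[n] := by
      simp [PySem.List.pyGetD_natCast, List.getD_eq_getElem?_getD, hn]
    simp only [List.foldl_cons, List.foldl_nil, hget]
    rw [List.sum_take_succ seq n hn]
    ring

-- main loop correspondence: walking the suffix with A's state (t, count = |pref|)
-- matches B's state (t, pre = sum pref), where seq = pref ++ rest
theorem pvMain (seq : List Int) :
    ∀ (rest pref : List Int) (t0 : Int), seq = pref ++ rest →
    (rest.foldl (fun (st : Int × Int) j =>
        let count := st.2 + 1
        let t1 := seq.foldl (fun t k => t + j * k) st.1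
        let t2 := (PySem.List.pyRange 0 count 1).foldl
                    (fun t l => t - j * PySem.List.pyGetD seq l 0) t1
        (t2, count)) (t0, (pref.length : Int))).1
    = (rest.foldl (fun (st : Int × Int) x =>
        let pre := st.2 + x
        (st.1 + x * (seq.sum - pre), pre)) (t0, pref.sum)).1 := by
  intro rest
  induction rest with
  | nil => intro pref t0 _; simp
  | cons j rest' ih =>
    intro pref t0 hseq
    simp only [List.foldl_cons]
    have hlen : pref.length + 1 ≤ seq.length := by
      subst hseq; simp
    have hcast : ((pref.length : Int) + 1) = ((pref.length + 1 : Nat) : Int) := by push_cast; ring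
    have htake : seq.take (pref.length + 1) = pref ++ [j] := by
      subst hseq
      rw [List.take_append]
      simp
    have hA : (seq.foldl (fun t k => t + j * k) t0) + -(j * (seq.take (pref.length+1)).sum)
        = t0 + j * (seq.sum - (pref.sum + j)) := by
      rw [pvInner1, htake]; simp; ring
    have step : ((PySem.List.pyRange 0 ((pref.length : Int) + 1) 1).foldl
          (fun t l => t - j * PySem.List.pyGetD seq l 0)
          (seq.foldl (fun t k => t + j * k) t0))
        = t0 + j * (seq.sum - (pref.sum + j)) := by
      rw [hcast, pvInner2 seq j (pref.length + 1) hlen]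
      rw [← hA]; ring
    have h2 : seq = (pref ++ [j]) ++ rest' := by simp [hseq]
    have := ih (pref ++ [j]) (t0 + j * (seq.sum - (pref.sum + j))) h2
    simp only [List.length_append, List.sum_append, List.length_cons, List.length_nil,
      List.sum_cons, List.sum_nil] at this
    simp only [step]
    simpa using this

-- ===== VERDICT (by name: the statement is the Claim_ definition above) =====
theorem cuadratica_resta_spec : Claim_equal_cuadratica_resta := by
  intro seq _
  unfold Spec_cuadratica_resta cuadratica_resta cuadratica_resta_alt
  have hsum : seq.foldl (· + ·) 0 = seq.sum := by
    simp [List.sum_eq_foldl]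
  rw [hsum]
  exact pvMain seq seq [] 0 (by simp)
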